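-- pv_equiv track=rewrite | github.com/akhor16/test-project | app.py | unset
-- ===== SOURCE A (Python) =====
-- from typing import List
--
-- def unset(xs: List[str]) -> List[str]:
--     """Algorithm to find symbols from runs with maximum length"""
--     if not xs:
--         return []
--
--     # Build runs
--     runs = []
--     cur = xs[0]
--     cnt = 1
--     for x in xs[1:]:
--         if x == cur:
--             cnt += 1
--         else:
--             runs.append((cur, cnt))
--             cur = x
--             cnt = 1
--     runs.append((cur, cnt))
--
--     max_len = max(length for _, length in runs)
--     if max_len == 1:
--         return []
--
--     # Collect unique symbols from runs with length == max_len, then sort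
--     chars = []
--     for sym, length in runs:
--         if length == max_len and sym not in chars:
--             chars.append(sym)
--     return sorted(chars)
-- ===== SOURCE B (Python) =====
-- from typing import List, Tuple
--
-- def _flush(sym: str, cnt: int, best: int, syms: List[str]) -> Tuple[int, List[str]]:
--     """Fold one finished run (sym, cnt) into the running best-length/symbol-set state."""
--     if cnt > best:
--         return cnt, [sym]
--     if cnt == best and sym not in syms:
--         return best, syms + [sym]
--     return best, syms
--
-- def unset(xs: List[str]) -> List[str]:
--     """Single streaming pass: no runs list is built; the best run length and the
--     (insertion-ordered, duplicate-free) symbols achieving it are maintained on the fly."""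
--     if not xs:
--         return []
--     cur, cnt, best, syms = xs[0], 1, 0, []
--     for x in xs[1:]:
--         if x == cur:
--             cnt += 1
--         else:
--             best, syms = _flush(cur, cnt, best, syms)
--             cur, cnt = x, 1
--     best, syms = _flush(cur, cnt, best, syms)
--     return [] if best == 1 else sorted(syms)
-- ===== Notes on version B (the rewrite author's own statement) =====
-- stated objective: alternative
-- what changed: B replaces A's three-phase pipeline (build an explicit runs list, scan it for the max length, scan it again to collect/dedup symbols) by a single streaming pass that never materialises the runs list, folding each finished run into a running (best length, symbol list) state.
import Mathlib
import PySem

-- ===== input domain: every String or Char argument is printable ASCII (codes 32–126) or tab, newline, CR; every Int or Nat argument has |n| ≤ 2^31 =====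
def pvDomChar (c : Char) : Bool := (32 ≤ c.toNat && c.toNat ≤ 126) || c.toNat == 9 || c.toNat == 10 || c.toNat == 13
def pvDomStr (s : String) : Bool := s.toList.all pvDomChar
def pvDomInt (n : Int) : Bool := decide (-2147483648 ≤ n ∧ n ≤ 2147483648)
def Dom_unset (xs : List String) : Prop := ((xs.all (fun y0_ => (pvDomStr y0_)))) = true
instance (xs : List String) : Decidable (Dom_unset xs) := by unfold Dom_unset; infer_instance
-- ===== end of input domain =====

-- B replaces A's runs-list pipeline (build runs, scan for max, scan again to collect) by a
-- single streaming pass that folds each finished run into a running (best, symbols) state.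

-- ===== PORT A =====
-- one loop iteration of A's run-building loop (state: runs list so far, current symbol, current count)
def pvAStep (st : List (String × Int) × String × Int) (x : String) :
    List (String × Int) × String × Int :=
  if x == st.2.1 then (st.1, st.2.1, st.2.2 + 1)
  else (st.1 ++ [(st.2.1, st.2.2)], x, 1)

-- A's second loop: collect unique symbols of runs whose length equals m
def pvCollect (m : Int) (acc : List String) (runs : List (String × Int)) : List String :=
  runs.foldl (fun acc r => if r.2 == m && !(acc.contains r.1) then acc ++ [r.1] else acc) acc

def unset (xs : List String) : List String :=
  match xs with
  | [] => []
  | x0 :: rest =>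
    let s := rest.foldl pvAStep ([], x0, 1)
    let runs := s.1 ++ [(s.2.1, s.2.2)]
    -- max(length for _, length in runs); runs is nonempty so max? is always some
    let maxLen := (PySem.List.max? (runs.map (fun r => r.2)) (fun y => y)).getD 0
    if maxLen == 1 then []
    else PySem.List.sorted (pvCollect maxLen [] runs) (fun y => y) false

-- ===== PORT B =====
-- fold one finished run (sym, cnt) into the running (best, syms) state
def pvFlush (sym : String) (cnt : Int) (bs : Int × List String) : Int × List String :=
  if cnt > bs.1 then (cnt, [sym])
  else if cnt == bs.1 && !(bs.2.contains sym) then (bs.1, bs.2 ++ [sym])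
  else bs

-- one loop iteration of B's single streaming pass (state: cur, cnt, best, syms)
def pvBStep (st : String × Int × Int × List String) (x : String) :
    String × Int × Int × List String :=
  if x == st.1 then (st.1, st.2.1 + 1, st.2.2)
  else (x, 1, pvFlush st.1 st.2.1 st.2.2)

def unset_alt (xs : List String) : List String :=
  match xs with
  | [] => []
  | x0 :: rest =>
    let st := rest.foldl pvBStep (x0, 1, 0, [])
    let fin := pvFlush st.1 st.2.1 st.2.2
    if fin.1 == 1 then [] else PySem.List.sorted fin.2 (fun y => y) false

-- ===== PRECONDITION & SPEC =====
def Spec_unset (xs : List String) (out : List String) : Prop := out = unset_alt xs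
instance (xs : List String) (out : List String) : Decidable (Spec_unset xs out) := by unfold Spec_unset; infer_instance

-- ===== CLAIM (what is proved, stated in full; the proofs are below) =====
def Claim_equal_unset : Prop := ∀ (xs : List String), Dom_unset xs → Spec_unset xs (unset xs)

-- ===== LEMMAS AND PROOFS =====
-- pvPF: B's per-run folding replayed over an explicit runs list
def pvPF (bs : Int × List String) (runs : List (String × Int)) : Int × List String :=
  runs.foldl (fun bs r => pvFlush r.1 r.2 bs) bs

-- pvMx: running maximum of run lengths, in A's "if greater" form
def pvMx (b : Int) (runs : List (String × Int)) : Int :=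
  runs.foldl (fun a r => if r.2 > a then r.2 else a) b

theorem pvMx_ge (runs : List (String × Int)) (b : Int) : b ≤ pvMx b runs := by
  induction runs generalizing b with
  | nil => simp [pvMx]
  | cons r rest ih =>
    simp only [pvMx, List.foldl_cons] at *
    have h1 : b ≤ (if r.2 > b then r.2 else b) := by split <;> omega
    exact le_trans h1 (ih _)

-- A's run-building fold with a nonempty accumulator, reduced to the empty-accumulator fold
theorem pvAStep_acc (rest : List String) (runs0 : List (String × Int)) (c : String) (n : Int) :
    List.foldl pvAStep (runs0, c, n) rest =
      (runs0 ++ (List.foldl pvAStep ([], c, n) rest).1, (List.foldl pvAStep ([], c, n) rest).2) := by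
  induction rest generalizing runs0 c n with
  | nil => simp
  | cons x rest ih =>
    simp only [List.foldl_cons, pvAStep]
    by_cases h : (x == c) = true
    · simp [h, ih runs0 c (n+1)]
    · simp only [h, Bool.false_eq_true, not_false_eq_true, if_neg, List.nil_append]
      rw [ih (runs0 ++ [(c, n)]) x 1, ih [(c, n)] x 1]
      simp

-- B's streaming fold computes exactly A's (cur, cnt) plus B's per-run fold over A's runs
theorem pvB_eq_A (rest : List String) (c : String) (n : Int) (bs : Int × List String) :
    List.foldl pvBStep (c, n, bs) rest =
      ((List.foldl pvAStep ([], c, n) rest).2.1, (List.foldl pvAStep ([], c, n) rest).2.2,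
        pvPF bs (List.foldl pvAStep ([], c, n) rest).1) := by
  induction rest generalizing c n bs with
  | nil => simp [pvPF]
  | cons x rest ih =>
    simp only [List.foldl_cons, pvBStep, pvAStep]
    by_cases h : (x == c) = true
    · simp [h, ih c (n+1) bs]
    · simp only [h, Bool.false_eq_true, not_false_eq_true, if_neg]
      simp only [List.nil_append]
      rw [ih x 1 (pvFlush c n bs), pvAStep_acc rest [(c, n)] x 1]
      simp [pvPF]

-- characterisation of B's per-run fold: running max plus A's collect loop
theorem pvPF_cons (bs : Int × List String) (r : String × Int) (rest : List (String × Int)) :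
    pvPF bs (r :: rest) = pvPF (pvFlush r.1 r.2 bs) rest := rfl

theorem pvMx_cons (b : Int) (r : String × Int) (rest : List (String × Int)) :
    pvMx b (r :: rest) = pvMx (if r.2 > b then r.2 else b) rest := rfl

theorem pvCollect_cons (m : Int) (acc : List String) (r : String × Int)
    (rest : List (String × Int)) :
    pvCollect m acc (r :: rest) =
      pvCollect m (if r.2 == m && !(acc.contains r.1) then acc ++ [r.1] else acc) rest := rfl

theorem pvPF_char (runs : List (String × Int)) (b : Int) (s : List String) :
    pvPF (b, s) runs =
      (pvMx b runs, pvCollect (pvMx b runs) (if pvMx b runs = b then s else []) runs) := by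
  induction runs generalizing b s with
  | nil => simp [pvPF, pvMx, pvCollect]
  | cons r rest ih =>
    rw [pvPF_cons, pvMx_cons, pvCollect_cons]
    by_cases h1 : r.2 > b
    · have he : (if r.2 > b then r.2 else b) = r.2 := if_pos h1
      rw [he]
      have hge : r.2 ≤ pvMx r.2 rest := pvMx_ge rest r.2
      have hM : ¬ pvMx r.2 rest = b := by omega
      have hflush : pvFlush r.1 r.2 (b, s) = (r.2, [r.1]) := by
        simp [pvFlush, h1]
      rw [hflush, ih r.2 [r.1]]
      congr 1
      rw [if_neg hM]
      by_cases h2 : pvMx r.2 rest = r.2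
      · simp [h2]
      · have : ¬ (r.2 == pvMx r.2 rest) = true := by simp; omega
        simp [h2, this]
    · have he : (if r.2 > b then r.2 else b) = b := if_neg h1
      rw [he]
      have hge : b ≤ pvMx b rest := pvMx_ge rest b
      by_cases h2 : r.2 = b
      · by_cases h3 : (s.contains r.1) = true
        · have h3' : r.1 ∈ s := by simpa using h3
          have hflush : pvFlush r.1 r.2 (b, s) = (b, s) := by
            simp [pvFlush, h1, h3']
          rw [hflush, ih b s]
          congr 1
          by_cases h4 : pvMx b rest = b
          · simp [h4, h2, h3']
          · have : ¬ (r.2 == pvMx b rest) = true := by simp; omega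
            simp [h4, this]
        · have h3' : r.1 ∉ s := by simpa using h3
          have hflush : pvFlush r.1 r.2 (b, s) = (b, s ++ [r.1]) := by
            simp [pvFlush, h2, h3']
          rw [hflush, ih b (s ++ [r.1])]
          congr 1
          by_cases h4 : pvMx b rest = b
          · simp [h4, h2, h3']
          · have : ¬ (r.2 == pvMx b rest) = true := by simp; omega
            simp [h4, this]
      · have hlt : r.2 < b := by omega
        have hflush : pvFlush r.1 r.2 (b, s) = (b, s) := by
          simp only [pvFlush]
          rw [if_neg h1]
          have : ¬ (r.2 == b && !((b, s).2.contains r.1)) = true := by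
            simp; intro h; omega
          rw [if_neg this]
        rw [hflush, ih b s]
        congr 1
        have : ¬ (r.2 == pvMx b rest) = true := by simp; omega
        rw [if_neg (by simp; omega : ¬ (r.2 == pvMx b rest && !((if pvMx b rest = b then s else []).contains r.1)) = true)]

-- every run built by A's loop has length ≥ 1 (counts start at 1 and only grow)
theorem pvAStep_pos (rest : List String) (runs0 : List (String × Int)) (c : String) (n : Int)
    (h0 : ∀ r ∈ runs0, 1 ≤ r.2) (hn : 1 ≤ n) :
    (∀ r ∈ (List.foldl pvAStep (runs0, c, n) rest).1, 1 ≤ r.2) ∧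
      1 ≤ (List.foldl pvAStep (runs0, c, n) rest).2.2 := by
  induction rest generalizing runs0 c n with
  | nil => exact ⟨h0, hn⟩
  | cons x rest ih =>
    simp only [List.foldl_cons, pvAStep]
    by_cases h : (x == c) = true
    · simp only [h, if_pos]
      exact ih runs0 c (n+1) h0 (by omega)
    · simp only [h, Bool.false_eq_true, not_false_eq_true, if_neg]
      refine ih (runs0 ++ [(c, n)]) x 1 ?_ le_rfl
      intro r hr
      rcases List.mem_append.mp hr with hr | hr
      · exact h0 r hr
      · simp at hr; simpa [hr] using hn

-- the running max in "if" form is foldl max on the mapped lengths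
theorem pvMx_eq_foldl_max (runs : List (String × Int)) (b : Int) :
    pvMx b runs = (runs.map (fun r => r.2)).foldl max b := by
  induction runs generalizing b with
  | nil => rfl
  | cons r rest ih =>
    simp only [pvMx, List.map_cons, List.foldl_cons] at *
    rw [ih]
    congr 1
    omega

theorem unset_eq_core (x0 : String) (rest : List String) :
    unset (x0 :: rest) = unset_alt (x0 :: rest) := by
  simp only [unset, unset_alt]
  rw [pvB_eq_A rest x0 1 (0, [])]
  set F := List.foldl pvAStep ([], x0, 1) rest with hF
  have hpos := pvAStep_pos rest [] x0 1 (by simp) le_rfl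
  rw [← hF] at hpos
  set runs := F.1 ++ [(F.2.1, F.2.2)] with hruns
  have hposr : ∀ r ∈ runs, 1 ≤ r.2 := by
    intro r hr
    rcases List.mem_append.mp hr with hr | hr
    · exact hpos.1 r hr
    · simp at hr; rcases hr with ⟨h1, h2⟩; omega
  -- B's final flush is one more pvPF step, so B's state is pvPF over the full runs list
  have hfin : pvFlush F.2.1 F.2.2 (pvPF (0, []) F.1) = pvPF (0, []) runs := by
    simp [pvPF, hruns]
  -- characterise pvPF over runs
  have hchar := pvPF_char runs 0 []
  have hM1 : 1 ≤ pvMx 0 runs := by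
    -- the max over a nonempty list of counts ≥ 1 is itself ≥ 1
    have : ∀ (l : List (String × Int)) (b : Int), (∀ r ∈ l, 1 ≤ r.2) → l ≠ [] → 1 ≤ pvMx b l := by
      intro l
      induction l with
      | nil => intro b _ h; exact absurd rfl h
      | cons r t ih =>
        intro b hall _
        by_cases ht : t = []
        · subst ht
          have := hall r (by simp)
          simp only [pvMx, List.foldl_cons, List.foldl_nil]
          split <;> omega
        · exact ih _ (fun r hr => hall r (by simp [hr])) ht
    exact this runs 0 hposr (by simp [hruns])
  have hinit : (if pvMx 0 runs = 0 then ([] : List String) else []) = [] := by split <;> rfl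
  rw [hinit] at hchar
  -- A's maxLen equals pvMx 0 runs
  have hmax : (PySem.List.max? (runs.map (fun r => r.2)) (fun y => y)).getD 0 = pvMx 0 runs := by
    have hne : runs.map (fun r => r.2) ≠ [] := by simp [hruns]
    rcases hl : runs.map (fun r => r.2) with _ | ⟨y, t⟩
    · exact absurd hl hne
    · rw [hl, PySem.List.max?_id_cons]
      simp only [Option.getD_some]
      rw [pvMx_eq_foldl_max, hl]
      simp only [List.foldl_cons]
      have hy : 1 ≤ y := by
        have : y ∈ runs.map (fun r => r.2) := by rw [hl]; simp
        rcases List.mem_map.mp this with ⟨r, hr, hry⟩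
        have := hposr r hr; omega
      have : max (0:Int) y = y := by omega
      rw [this]
  rw [hmax, hfin, hchar]

-- ===== VERDICT (by name: the statement is the Claim_ definition above) =====
theorem unset_spec : Claim_equal_unset := by
  unfold Claim_equal_unset
  intro xs _
  unfold Spec_unset
  cases xs with
  | nil => rfl
  | cons x0 rest => exact unset_eq_core x0 rest
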